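-- pv_equiv track=rewrite | github.com/tleedepriest/cs61a | discussions/tree_recursions_and_lists.py | check_hole_number
-- ===== SOURCE A (Python) =====
-- def check_hole_number(n):
--     """
--     A hole numberis a number in which every other digit dips
--     below the digits immediately adjacent to it
--     function only accepts numbers with odd number of digits
--     >>> check_hole_number(123)
--     False
--     >>> check_hole_number(3241968)
--     True
--     >>> check_hole_number(3245968)
--     False
--     """
--     #define variables because my working memory is bad
--     end_digit = n%10
--     remaining = n//10
--     adjacent_end = (n//10)%10
--     adjacent_adjacent_end = (n//100)%10
--
--     if adjacent_end < end_digit and adjacent_end < adjacent_adjacent_end: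
--         return check_hole_number(n//100) #every OTHER digit
--     #if it itterates through everything then then n will be one digit
--     return not n//10
-- ===== SOURCE B (Python) =====
-- def check_hole_number(n):
--     if n < 0:
--         return False
--     digits = []
--     while True:
--         digits.append(n % 10)
--         n //= 10
--         if n == 0:
--             break
--
--     def dips(d):
--         if len(d) == 1:
--             return True
--         if len(d) < 3:
--             return False
--         return d[1] < d[0] and d[1] < d[2] and dips(d[2:])
--
--     return dips(digits)
-- ===== Notes on version B (the rewrite author's own statement) =====
-- stated objective: alternative
-- what changed: B extracts the digit list once and checks the dip pattern by a linear scan over adjacent digit triples, instead of A's tail recursion that re-divides the number by 100 at each step.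
import Mathlib
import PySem

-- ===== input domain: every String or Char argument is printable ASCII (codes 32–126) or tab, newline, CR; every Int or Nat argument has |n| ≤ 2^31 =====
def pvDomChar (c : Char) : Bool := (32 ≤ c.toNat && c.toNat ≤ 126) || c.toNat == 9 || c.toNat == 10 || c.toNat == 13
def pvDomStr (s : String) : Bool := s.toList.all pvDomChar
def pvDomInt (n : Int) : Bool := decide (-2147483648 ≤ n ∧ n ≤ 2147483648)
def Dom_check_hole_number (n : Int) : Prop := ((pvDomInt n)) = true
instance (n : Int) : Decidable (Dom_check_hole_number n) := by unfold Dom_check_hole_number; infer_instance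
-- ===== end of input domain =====

-- B replaces A's strip-two-digits tail recursion by extracting the digit list once and
-- scanning adjacent digit triples; alternative decomposition, same cost.

-- ===== PORT A =====
-- A's tail recursion, with a fuel guard that only makes it total: each recursive step strips
-- two digits, so |n| + 1 units of fuel are never exhausted (proved in the lemmas below)
def pvCHNgo : Nat → Int → Bool
  | 0, _ => false
  | fuel + 1, n =>
    let end_digit := PySem.Int.mod n 10
    let adjacent_end := PySem.Int.mod (PySem.Int.floordiv n 10) 10
    let adjacent_adjacent_end := PySem.Int.mod (PySem.Int.floordiv n 100) 10
    if adjacent_end < end_digit ∧ adjacent_end < adjacent_adjacent_end then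
      pvCHNgo fuel (PySem.Int.floordiv n 100)
    else
      -- `not n//10`: truthy iff n//10 == 0
      decide (PySem.Int.floordiv n 10 = 0)

def check_hole_number (n : Int) : Bool := pvCHNgo (n.natAbs + 1) n

-- ===== PORT B =====
-- Source B's digit-extraction loop; it only runs after the `n < 0` guard, so it is transcribed
-- on Nat (exact for the nonnegative n it is applied to), again with a harmless fuel guard
def pvDigitsGo : Nat → Nat → List Int
  | 0, n => [((n % 10 : Nat) : Int)]
  | fuel + 1, n =>
    if n / 10 = 0 then [((n % 10 : Nat) : Int)]
    else ((n % 10 : Nat) : Int) :: pvDigitsGo fuel (n / 10)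

def pvDigits (n : Nat) : List Int := pvDigitsGo n n

-- Source B's `dips` helper, recursion on the digit list
def pvDips : List Int → Bool
  | [_] => true
  | a :: b :: c :: rest => decide (b < a) && decide (b < c) && pvDips (c :: rest)
  | _ => false

def check_hole_number_alt (n : Int) : Bool :=
  if n < 0 then false
  else pvDips (pvDigits n.toNat)

-- ===== PRECONDITION & SPEC =====
def Spec_check_hole_number (n : Int) (out : Bool) : Prop := out = check_hole_number_alt n
instance (n : Int) (out : Bool) : Decidable (Spec_check_hole_number n out) := by unfold Spec_check_hole_number; infer_instance

-- ===== CLAIM (what is proved, stated in full; the proofs are below) =====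
def Claim_equal_check_hole_number : Prop := ∀ (n : Int), Dom_check_hole_number n → Spec_check_hole_number n (check_hole_number n)

-- ===== LEMMAS AND PROOFS =====

-- when the dip condition holds, the stripped number shrinks in magnitude (fuel never runs out)
theorem pvStepLt (n : Int)
    (h1 : PySem.Int.mod (PySem.Int.floordiv n 10) 10 < PySem.Int.mod n 10)
    (_h2 : PySem.Int.mod (PySem.Int.floordiv n 10) 10 < PySem.Int.mod (PySem.Int.floordiv n 100) 10) :
    (PySem.Int.floordiv n 100).natAbs < n.natAbs := by
  simp only [PySem.Int.floordiv_eq_ediv_of_pos (by norm_num : (0:Int) < 10),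
    PySem.Int.floordiv_eq_ediv_of_pos (by norm_num : (0:Int) < 100),
    PySem.Int.mod_eq_emod_of_pos (by norm_num : (0:Int) < 10)] at *
  omega

-- A returns False on every negative input (the recursion stays negative, so the final quotient is nonzero)
theorem pvGo_neg : ∀ (f : Nat) (n : Int), n < 0 → n.natAbs < f → pvCHNgo f n = false := by
  intro f
  induction f with
  | zero => intro n hn hk; omega
  | succ f ih =>
    intro n hn hk
    rw [pvCHNgo]
    split
    · next h =>
      have hlt := pvStepLt n h.1 h.2
      have hneg : PySem.Int.floordiv n 100 < 0 := by
        rw [PySem.Int.floordiv_eq_ediv_of_pos (by norm_num : (0:Int) < 100)]; omega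
      exact ih _ hneg (by omega)
    · next h =>
      rw [PySem.Int.floordiv_eq_ediv_of_pos (by norm_num : (0:Int) < 10)]
      simp only [decide_eq_false_iff_not]
      omega

theorem pvFdiv10 (a : Nat) : PySem.Int.floordiv (a : Int) 10 = ((a / 10 : Nat) : Int) := by
  exact_mod_cast PySem.Int.floordiv_natCast a 10

theorem pvFdiv100 (a : Nat) : PySem.Int.floordiv (a : Int) 100 = ((a / 100 : Nat) : Int) := by
  exact_mod_cast PySem.Int.floordiv_natCast a 100

theorem pvFmod10 (a : Nat) : PySem.Int.mod (a : Int) 10 = ((a % 10 : Nat) : Int) := by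
  exact_mod_cast PySem.Int.mod_natCast a 10

-- the fuel guard of B's digit loop never fires: n units of fuel always suffice
theorem pvDigitsGo_eq : ∀ (f n : Nat), n ≤ f →
    pvDigitsGo f n = if n / 10 = 0 then [((n % 10 : Nat) : Int)]
                     else ((n % 10 : Nat) : Int) :: pvDigitsGo (f - 1) (n / 10) := by
  intro f
  cases f with
  | zero =>
    intro n hn
    have h0 : n / 10 = 0 := by omega
    conv_lhs => rw [pvDigitsGo]
    rw [if_pos h0]
  | succ f =>
    intro n _
    conv_lhs => rw [pvDigitsGo]
    norm_num

-- the loop's result does not depend on the fuel, as long as it is at least the argument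
theorem pvDigitsGo_fuel : ∀ (m a b : Nat), m ≤ a → m ≤ b → pvDigitsGo a m = pvDigitsGo b m := by
  intro m
  induction m using Nat.strong_induction_on with
  | _ m ih =>
    intro a b ha hb
    rw [pvDigitsGo_eq a m ha, pvDigitsGo_eq b m hb]
    split
    · rfl
    · next h =>
      congr 1
      exact ih (m / 10) (by omega) (a - 1) (b - 1) (by omega) (by omega)

theorem pvDigits_eq (n : Nat) : pvDigits n = if n / 10 = 0 then [((n % 10 : Nat) : Int)]
    else ((n % 10 : Nat) : Int) :: pvDigits (n / 10) := by
  unfold pvDigits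
  rw [pvDigitsGo_eq n n le_rfl]
  split
  · rfl
  · next h =>
    congr 1
    exact pvDigitsGo_fuel (n / 10) (n - 1) (n / 10) (by omega) le_rfl

theorem pvDigits_head (m : Nat) : ∃ t, pvDigits m = ((m % 10 : Nat) : Int) :: t := by
  rw [pvDigits_eq]; split
  · exact ⟨[], rfl⟩
  · exact ⟨_, rfl⟩

-- A agrees with B's digit-scan on every natural number
theorem pvGo_nat : ∀ (f m : Nat), m < f → pvCHNgo f (m : Int) = pvDips (pvDigits m) := by
  intro f
  induction f with
  | zero => intro m hm; omega
  | succ f ih =>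
    intro m hm
    rw [pvCHNgo]
    simp only [pvFdiv10, pvFdiv100, pvFmod10, Nat.cast_lt]
    by_cases hm100 : m < 100
    · -- adjadj = 0, so the dip condition is impossible
      have h100 : m / 100 = 0 := by omega
      rw [h100, if_neg (by omega)]
      by_cases hs : m < 10
      · have h10 : m / 10 = 0 := by omega
        rw [h10]
        simp only [Nat.cast_zero]
        rw [pvDigits_eq, if_pos h10]
        simp [pvDips]
      · have h10 : m / 10 ≠ 0 := by omega
        have h1010 : (m / 10) / 10 = 0 := by omega
        rw [pvDigits_eq, if_neg h10, pvDigits_eq, if_pos h1010]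
        simp [pvDips]
        omega
    · -- at least three digits: unfold two of them on B's side
      have h10 : m / 10 ≠ 0 := by omega
      have h1010 : (m / 10) / 10 ≠ 0 := by omega
      have hdd : m / 10 / 10 = m / 100 := by omega
      obtain ⟨t, ht⟩ := pvDigits_head (m / 100)
      rw [pvDigits_eq, if_neg h10, pvDigits_eq, if_neg h1010, hdd, ht]
      rw [pvDips]
      split_ifs with h
      · have hIH := ih (m / 100) (by omega)
        rw [ht] at hIH
        rw [decide_eq_true (by exact_mod_cast h.1 : ((m / 10 % 10 : Nat) : Int) < ((m % 10 : Nat) : Int)),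
            decide_eq_true (by exact_mod_cast h.2 : ((m / 10 % 10 : Nat) : Int) < ((m / 100 % 10 : Nat) : Int)),
            Bool.true_and, Bool.true_and]
        exact hIH
      · have hAfalse : ((m / 10 : Nat) : Int) ≠ 0 := by exact_mod_cast h10
        rcases not_and_or.mp h with h' | h'
        · rw [decide_eq_false (by exact_mod_cast h' : ¬ ((m / 10 % 10 : Nat) : Int) < ((m % 10 : Nat) : Int)),
              decide_eq_false hAfalse, Bool.false_and, Bool.false_and]
        · rw [decide_eq_false (by exact_mod_cast h' : ¬ ((m / 10 % 10 : Nat) : Int) < ((m / 100 % 10 : Nat) : Int)),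
              decide_eq_false hAfalse, Bool.and_false, Bool.false_and]

-- ===== VERDICT (by name: the statement is the Claim_ definition above) =====
theorem check_hole_number_spec : Claim_equal_check_hole_number := by
  intro n _
  unfold Spec_check_hole_number check_hole_number_alt check_hole_number
  by_cases hn : n < 0
  · rw [if_pos hn]
    exact pvGo_neg (n.natAbs + 1) n hn (by omega)
  · rw [if_neg hn]
    have h1 : n = ((n.toNat : Nat) : Int) := by omega
    have h2 : n.natAbs = n.toNat := by omega
    calc pvCHNgo (n.natAbs + 1) n = pvCHNgo (n.toNat + 1) ((n.toNat : Nat) : Int) := by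
            rw [← h1, h2]
      _ = pvDips (pvDigits n.toNat) := pvGo_nat (n.toNat + 1) n.toNat (by omega)
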